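-- pv_equiv track=rewrite | github.com/smprather/time-plot | time_plot/plugins/spice_pwl/__init__.py | _aggregate_continuations
-- ===== SOURCE A (Python) =====
-- def _aggregate_continuations(raw_lines: list[str]) -> list[str]:
--     logical: list[str] = []
--     for line in raw_lines:
--         if line.startswith("+") and logical:
--             logical[-1] = logical[-1] + " " + line[1:]
--         else:
--             logical.append(line)
--     return logical
-- ===== SOURCE B (Python) =====
-- def _aggregate_continuations(raw_lines: list[str]) -> list[str]:
--     out: list[str] = []
--     i = 0
--     n = len(raw_lines)
--     while i < n:
--         parts = [raw_lines[i]]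
--         i += 1
--         while i < n and raw_lines[i].startswith("+"):
--             parts.append(raw_lines[i][1:])
--             i += 1
--         out.append(" ".join(parts))
--     return out
-- ===== Notes on version B (the rewrite author's own statement) =====
-- stated objective: alternative
-- what changed: Replaces the single accumulation loop that rewrites logical[-1] with a nested consume-the-run decomposition: an outer loop takes each starter line, an inner loop consumes its whole run of '+' continuations, and the logical line is formed once by ' '.join.
import Mathlib
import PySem

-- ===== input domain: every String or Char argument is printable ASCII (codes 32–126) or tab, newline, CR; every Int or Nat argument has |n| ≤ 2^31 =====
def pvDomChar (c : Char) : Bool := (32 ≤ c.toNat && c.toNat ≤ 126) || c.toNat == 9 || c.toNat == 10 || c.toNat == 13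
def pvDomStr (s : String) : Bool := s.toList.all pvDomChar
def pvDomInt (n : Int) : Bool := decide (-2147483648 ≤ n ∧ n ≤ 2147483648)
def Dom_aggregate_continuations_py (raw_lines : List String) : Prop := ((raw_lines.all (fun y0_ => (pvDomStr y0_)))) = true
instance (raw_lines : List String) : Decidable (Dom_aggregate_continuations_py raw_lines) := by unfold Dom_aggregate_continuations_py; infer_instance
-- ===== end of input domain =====

-- B replaces A's single loop that rewrites logical[-1] by an outer loop per starter line with an
-- inner loop consuming its run of '+' continuations, joined once; alternative decomposition, same cost.

-- ===== PORT A =====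
-- line[1:]
def pvTail1 (line : String) : String := PySem.Str.slice line (some 1) none

def aggregate_continuations_py (raw_lines : List String) : List String :=
  raw_lines.foldl (fun logical line =>
    if PySem.Str.startswith line "+" && !logical.isEmpty then
      logical.dropLast ++ [(logical.getLastD "") ++ " " ++ pvTail1 line]
    else
      logical ++ [line]) []

-- ===== PORT B =====
-- " ".join(parts) where parts = first :: conts
def pvJoinSp (first : String) (conts : List String) : String :=
  conts.foldl (fun a c => a ++ " " ++ c) first

def pvIsCont (s : String) : Bool := PySem.Str.startswith s "+"

-- outer while: take starter, inner while: consume the run of '+' continuation lines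
def aggregate_continuations_py_alt (raw_lines : List String) : List String :=
  match raw_lines with
  | [] => []
  | l :: rest =>
    pvJoinSp l ((rest.takeWhile pvIsCont).map pvTail1)
      :: aggregate_continuations_py_alt (rest.dropWhile pvIsCont)
termination_by raw_lines.length
decreasing_by
  simpa using Nat.lt_succ_of_le (List.length_dropWhile_le _ _)

-- ===== PRECONDITION & SPEC =====
def Spec_aggregate_continuations_py (raw_lines : List String) (out : List String) : Prop := out = aggregate_continuations_py_alt raw_lines
instance (raw_lines : List String) (out : List String) : Decidable (Spec_aggregate_continuations_py raw_lines out) := by unfold Spec_aggregate_continuations_py; infer_instance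

-- ===== CLAIM (what is proved, stated in full; the proofs are below) =====
def Claim_equal_aggregate_continuations_py : Prop := ∀ (raw_lines : List String), Dom_aggregate_continuations_py raw_lines → Spec_aggregate_continuations_py raw_lines (aggregate_continuations_py raw_lines)

-- ===== LEMMAS AND PROOFS =====

-- A's loop reformulated with an explicit "current last line" state
def pvRun (cur : String) : List String → List String
  | [] => [cur]
  | l :: xs =>
    if pvIsCont l then pvRun (cur ++ " " ++ pvTail1 l) xs
    else cur :: pvRun l xs

theorem pv_foldA_eq_run (xs : List String) : ∀ (done : List String) (cur : String),
    xs.foldl (fun logical line =>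
      if PySem.Str.startswith line "+" && !logical.isEmpty then
        logical.dropLast ++ [(logical.getLastD "") ++ " " ++ pvTail1 line]
      else
        logical ++ [line]) (done ++ [cur]) = done ++ pvRun cur xs := by
  induction xs with
  | nil => intro done cur; simp [pvRun]
  | cons l xs ih =>
    intro done cur
    rw [List.foldl_cons, pvRun]
    have hne : (done ++ [cur]).isEmpty = false := by simp
    by_cases h : pvIsCont l = true
    · have hc : PySem.Str.startswith l "+" = true := h
      rw [if_pos h, hc, hne]
      simp only [Bool.not_false, Bool.and_self, if_true]
      rw [List.dropLast_concat, List.getLastD_concat, ih]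
    · have hc : PySem.Str.startswith l "+" = false := Bool.eq_false_iff.mpr h
      rw [if_neg h, hc, hne]
      simp only [Bool.false_and, Bool.false_eq_true, if_false]
      rw [List.append_assoc done [cur] [l], ← List.append_assoc done]
      rw [ih (done ++ [cur]) l]
      simp

theorem pv_run_eq_alt (xs : List String) : ∀ (cur : String),
    pvRun cur xs = pvJoinSp cur ((xs.takeWhile pvIsCont).map pvTail1)
      :: aggregate_continuations_py_alt (xs.dropWhile pvIsCont) := by
  induction xs with
  | nil =>
    intro cur
    rw [pvRun]
    simp only [List.takeWhile_nil, List.dropWhile_nil, List.map_nil]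
    rw [aggregate_continuations_py_alt]
    rfl
  | cons l xs ih =>
    intro cur
    rw [pvRun]
    by_cases h : pvIsCont l = true
    · rw [if_pos h, List.takeWhile_cons_of_pos h, List.dropWhile_cons_of_pos h,
        List.map_cons, ih]
      rfl
    · have hc : pvIsCont l = false := Bool.eq_false_iff.mpr h
      rw [if_neg h, List.takeWhile_cons_of_neg h, List.dropWhile_cons_of_neg h,
        List.map_nil, ih]
      conv_rhs => rw [aggregate_continuations_py_alt]
      rfl

-- ===== VERDICT (by name: the statement is the Claim_ definition above) =====
theorem aggregate_continuations_py_spec : Claim_equal_aggregate_continuations_py := by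
  intro raw_lines _
  unfold Spec_aggregate_continuations_py aggregate_continuations_py
  cases raw_lines with
  | nil =>
    rw [List.foldl_nil, aggregate_continuations_py_alt]
  | cons l xs =>
    rw [List.foldl_cons]
    have h0 : (if PySem.Str.startswith l "+" && !(List.nil (α := String)).isEmpty then
        (List.nil (α := String)).dropLast ++ [((List.nil (α := String)).getLastD "") ++ " " ++ pvTail1 l]
      else (List.nil (α := String)) ++ [l]) = [l] := by
      simp only [List.isEmpty_nil, Bool.not_true, Bool.and_false, Bool.false_eq_true, if_false,
        List.nil_append]
    rw [h0]
    have := pv_foldA_eq_run xs [] l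
    simp only [List.nil_append] at this
    rw [this, pv_run_eq_alt]
    conv_rhs => rw [aggregate_continuations_py_alt]
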